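-- pv_equiv track=rewrite | github.com/KazukiOnodera/Santander-Customer-Transaction-Prediction | py/806_cv_opt_round.py | get_drop_roundfeature
-- ===== SOURCE A (Python) =====
-- def get_drop_roundfeature(col, round_):
--     """
--
--     if round_ is 3, use by *_r3, drop *_r2~*_r0
--
--     """
--
--     col_r3 = [c for c in col if c.endswith('_r3')]
--     col_r2 = [c for c in col if c.endswith('_r2')]
--     col_r1 = [c for c in col if c.endswith('_r1')]
--     col_r0 = [c for c in col if c.endswith('_r0')]
--
--     if round_ == 4:
--         return col_r3 + col_r2 + col_r1 + col_r0
--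
--     if round_ == 3:
--         return col_r2 + col_r1 + col_r0
--
--     elif round_ == 2:
--         return col_r1 + col_r0
--
--     elif round_ == 1:
--         return col_r0
--
--     elif round_ == 0:
--         return []
--
--     else:
--         raise(round_)
--     return
-- ===== SOURCE B (Python) =====
-- def get_drop_roundfeature(col, round_):
--     if round_ not in (0, 1, 2, 3, 4):
--         raise round_
--     suffixes = ('_r0', '_r1', '_r2', '_r3')[:round_]
--     keep = [c for c in col if c.endswith(suffixes)]
--     return sorted(keep, key=lambda c: c[-3:], reverse=True)
-- ===== Notes on version B (the rewrite author's own statement) =====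
-- stated objective: alternative
-- what changed: B filters col once for columns ending in any of the first round_ suffixes ('_r0'..'_r3')[:round_] and then stable-sorts them in reverse by their 3-character suffix, instead of A's four separate filter passes concatenated by a five-way branch on round_.
import Mathlib
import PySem

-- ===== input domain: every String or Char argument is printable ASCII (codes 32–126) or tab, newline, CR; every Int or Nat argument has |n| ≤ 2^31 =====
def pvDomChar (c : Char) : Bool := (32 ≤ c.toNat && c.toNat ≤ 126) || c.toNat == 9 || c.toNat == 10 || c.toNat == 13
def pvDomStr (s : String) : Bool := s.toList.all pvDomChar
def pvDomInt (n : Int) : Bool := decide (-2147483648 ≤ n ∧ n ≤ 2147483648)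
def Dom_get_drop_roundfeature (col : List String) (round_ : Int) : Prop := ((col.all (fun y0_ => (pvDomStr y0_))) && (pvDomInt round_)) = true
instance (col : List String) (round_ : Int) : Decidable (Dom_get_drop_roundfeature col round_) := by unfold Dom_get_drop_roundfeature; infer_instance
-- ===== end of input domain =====

-- B replaces A's four filter passes and five-way concatenation branch by a single filter of the
-- columns ending in one of the first round_ suffixes, followed by a stable reverse sort on the
-- three-character suffix (objective: alternative).

-- ===== PORT A =====
def get_drop_roundfeature (col : List String) (round_ : Int) : List String :=
  let col_r3 := col.filter (fun c => PySem.Str.endswith c "_r3")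
  let col_r2 := col.filter (fun c => PySem.Str.endswith c "_r2")
  let col_r1 := col.filter (fun c => PySem.Str.endswith c "_r1")
  let col_r0 := col.filter (fun c => PySem.Str.endswith c "_r0")
  if round_ = 4 then col_r3 ++ col_r2 ++ col_r1 ++ col_r0
  else if round_ = 3 then col_r2 ++ col_r1 ++ col_r0
  else if round_ = 2 then col_r1 ++ col_r0
  else if round_ = 1 then col_r0
  else if round_ = 0 then []
  else []  -- Python raises round_ here; excluded by Pre_

-- ===== PORT B =====
def get_drop_roundfeature_alt (col : List String) (round_ : Int) : List String :=
  if round_ = 0 ∨ round_ = 1 ∨ round_ = 2 ∨ round_ = 3 ∨ round_ = 4 then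
    let suffixes := PySem.List.slice ["_r0", "_r1", "_r2", "_r3"] none (some round_)
    let keep := col.filter (fun c => suffixes.any (fun s => PySem.Str.endswith c s))
    PySem.List.sorted keep (fun c => PySem.Str.slice c (some (-3)) none) true
  else []  -- Python raises round_ here; excluded by Pre_

-- ===== PRECONDITION & SPEC =====
-- Pre_ excludes exactly the inputs on which A (and B) raise: round_ outside {0,1,2,3,4}.
def Pre_get_drop_roundfeature (col : List String) (round_ : Int) : Prop :=
  round_ = 0 ∨ round_ = 1 ∨ round_ = 2 ∨ round_ = 3 ∨ round_ = 4
instance (col : List String) (round_ : Int) : Decidable (Pre_get_drop_roundfeature col round_) := by unfold Pre_get_drop_roundfeature; infer_instance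
def pvWitness_get_drop_roundfeature : List String × Int := (["var_0_r3", "var_1_r0", "plain"], 3)

def Spec_get_drop_roundfeature (col : List String) (round_ : Int) (out : List String) : Prop := out = get_drop_roundfeature_alt col round_
instance (col : List String) (round_ : Int) (out : List String) : Decidable (Spec_get_drop_roundfeature col round_ out) := by unfold Spec_get_drop_roundfeature; infer_instance

-- ===== CLAIM (what is proved, stated in full; the proofs are below) =====
def Claim_equal_get_drop_roundfeature : Prop := ∀ (col : List String) (round_ : Int), Dom_get_drop_roundfeature col round_ → Pre_get_drop_roundfeature col round_ → Spec_get_drop_roundfeature col round_ (get_drop_roundfeature col round_)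

-- ===== LEMMAS AND PROOFS =====

-- B's sort key: the last three characters of the column name.
def pvKey (c : String) : String := PySem.Str.slice c (some (-3)) none

-- The comparator used by PySem's reverse-stable sort on that key.
def pvBefore (a b : String) : Bool := decide (pvKey b < pvKey a)

-- The grouped form both sides are reduced to: the ks-groups of ys, in ks-order.
def pvGroups (ks : List String) (ys : List String) : List String :=
  (ks.map (fun k => ys.filter (fun c => pvKey c = k))).flatten

theorem pvInsertBy_append (before : String → String → Bool) (x : String) (as bs : List String)
    (h : ∀ y ∈ as, before x y = false) :
    PySem.List.insertBy before x (as ++ bs) = as ++ PySem.List.insertBy before x bs := by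
  induction as with
  | nil => simp
  | cons a as ih =>
    have ha := h a (by simp)
    simp [PySem.List.insertBy, ha, ih (fun y hy => h y (by simp [hy]))]

theorem pvInsertBy_front (before : String → String → Bool) (x : String) (bs : List String)
    (h : ∀ y ∈ bs, before x y = true) :
    PySem.List.insertBy before x bs = x :: bs := by
  cases bs with
  | nil => simp [PySem.List.insertBy]
  | cons b bs => simp [PySem.List.insertBy, h b (by simp)]

theorem pvMem_groups (ks ys : List String) (y : String) (hy : y ∈ pvGroups ks ys) :
    pvKey y ∈ ks := by
  unfold pvGroups at hy
  simp only [List.mem_flatten, List.mem_map] at hy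
  obtain ⟨l, ⟨k, hk, rfl⟩, hyl⟩ := hy
  have hk' : pvKey y = k := by simpa using List.of_mem_filter hyl
  exact hk' ▸ hk

theorem pvInsert_groups (ks : List String) (hks : ks.Pairwise (fun a b => b < a))
    (c : String) (hc : pvKey c ∈ ks) (ys : List String) :
    PySem.List.insertBy pvBefore c (pvGroups ks ys) = pvGroups ks (ys ++ [c]) := by
  induction ks with
  | nil => simp at hc
  | cons k ks ih =>
    rcases List.pairwise_cons.mp hks with ⟨hlt, hks'⟩
    have hgrp : ∀ zs, pvGroups (k :: ks) zs
        = zs.filter (fun c => pvKey c = k) ++ pvGroups ks zs := by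
      intro zs; simp [pvGroups]
    by_cases h : pvKey c = k
    · -- c belongs to the first group: skip that group, then insert in front of the rest
      have h1 : ∀ y ∈ ys.filter (fun c => pvKey c = k), pvBefore c y = false := by
        intro y hy
        have hyk : pvKey y = k := by simpa using List.of_mem_filter hy
        simp [pvBefore, hyk, h]
      have h2 : ∀ y ∈ pvGroups ks ys, pvBefore c y = true := by
        intro y hy
        have hky := pvMem_groups ks ys y hy
        have : pvKey y < k := hlt _ hky
        simp [pvBefore, h, this]
      have hrest : pvGroups ks (ys ++ [c]) = pvGroups ks ys := by
        unfold pvGroups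
        congr 1
        apply List.map_congr_left
        intro k' hk'
        have hne : ¬ pvKey c = k' := by
          intro hkk
          have hlt' := hlt k' hk'
          rw [← hkk, h] at hlt'
          exact lt_irrefl _ hlt'
        simp [List.filter_append, hne]
      rw [hgrp ys, pvInsertBy_append _ _ _ _ h1, pvInsertBy_front _ _ _ h2,
        hgrp (ys ++ [c]), hrest]
      simp [List.filter_append, h]
    · -- c belongs to a later group: skip the first group entirely
      have hc' : pvKey c ∈ ks := by rcases List.mem_cons.mp hc with h' | h' <;> [exact absurd h' h; exact h']
      have h1 : ∀ y ∈ ys.filter (fun c => pvKey c = k), pvBefore c y = false := by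
        intro y hy
        have hyk : pvKey y = k := by simpa using List.of_mem_filter hy
        have hck : pvKey c < k := hlt _ hc'
        simp [pvBefore, hyk, not_lt_of_gt hck]
      rw [hgrp ys, pvInsertBy_append _ _ _ _ h1, ih hks' hc', hgrp (ys ++ [c])]
      simp [List.filter_append, h]

theorem pvFoldl_groups (ks : List String) (hks : ks.Pairwise (fun a b => b < a))
    (xs : List String) (hx : ∀ c ∈ xs, pvKey c ∈ ks) (ys : List String) :
    xs.foldl (fun acc x => PySem.List.insertBy pvBefore x acc) (pvGroups ks ys)
      = pvGroups ks (ys ++ xs) := by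
  induction xs generalizing ys with
  | nil => simp
  | cons x xs ih =>
    rw [List.foldl_cons, pvInsert_groups ks hks x (hx x (by simp)) ys,
      ih (fun c hc => hx c (by simp [hc])) (ys ++ [x])]
    simp

theorem pvSortedRev_groups (ks : List String) (hks : ks.Pairwise (fun a b => b < a))
    (xs : List String) (hx : ∀ c ∈ xs, pvKey c ∈ ks) :
    PySem.List.sorted xs pvKey true = pvGroups ks xs := by
  have h0 : pvGroups ks [] = [] := by simp [pvGroups]
  have hfold := pvFoldl_groups ks hks xs hx []
  rw [h0] at hfold
  simp only [List.nil_append] at hfold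
  rw [PySem.List.sorted_rev_eq_foldl_insertBy,
    show (fun (a b : String) => decide (pvKey b < pvKey a)) = pvBefore from rfl, hfold]

-- a column ending in a three-character suffix has that suffix as its pvKey
theorem pvKey_of_endswith (c s : String) (hlen : s.toList.length = 3)
    (h : PySem.Str.endswith c s = true) : pvKey c = s := by
  have hsuf : s.toList <:+ c.toList := by
    rw [← PySem.Chars.endswith_iff]
    simpa using h
  obtain ⟨t, ht⟩ := hsuf
  apply String.toList_inj.mp
  have : (pvKey c).toList = PySem.List.slice c.toList (some (-3)) none := by
    simp [pvKey, PySem.Str.slice]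
  rw [this, PySem.List.slice_some_none]
  have hlc : c.toList.length = t.length + 3 := by rw [← ht]; simp [hlen]
  rw [show PySem.List.clampIdx c.toList.length (-3) = c.toList.length - 3 from by
    simpa using PySem.List.clampIdx_neg_ofNat c.toList.length 3 (by norm_num)]
  rw [hlc, ← ht]
  simp

-- pointwise description of B's keep-filter refined by key value
theorem pvPoint (c s : String) (ss : List String) (hs : s ∈ ss)
    (hlen : ∀ t ∈ ss, t.toList.length = 3) :
    ((ss.any (fun t => PySem.Str.endswith c t)) && decide (pvKey c = s))
      = PySem.Str.endswith c s := by
  by_cases h : PySem.Str.endswith c s = true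
  · have hk := pvKey_of_endswith c s (hlen s hs) h
    have hany : ss.any (fun t => PySem.Str.endswith c t) = true :=
      List.any_eq_true.mpr ⟨s, hs, h⟩
    rw [h, hany, hk]
    simp
  · have hf : PySem.Str.endswith c s = false := Bool.eq_false_iff.mpr h
    rw [hf]
    cases ha : ss.any (fun t => PySem.Str.endswith c t) with
    | false => simp
    | true =>
      obtain ⟨t, ht, hct⟩ := List.any_eq_true.mp ha
      have hk := pvKey_of_endswith c t (hlen t ht) hct
      have hne : decide (pvKey c = s) = false := by
        refine decide_eq_false fun hcs => h ?_
        rw [show s = t from by rw [← hcs, hk]]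
        exact hct
      simp [hne]

-- one group of B's result is exactly one of A's filter passes
theorem pvGroup_filter (col : List String) (s : String) (ss : List String) (hs : s ∈ ss)
    (hlen : ∀ t ∈ ss, t.toList.length = 3) :
    (col.filter (fun c => ss.any (fun t => PySem.Str.endswith c t))).filter
        (fun c => pvKey c = s)
      = col.filter (fun c => PySem.Str.endswith c s) := by
  rw [List.filter_filter]
  apply List.filter_congr
  intro c _
  simpa [Bool.and_comm] using pvPoint c s ss hs hlen

theorem pvLen3 (ss : List String) (h : ∀ t ∈ ss, t ∈ (["_r0", "_r1", "_r2", "_r3"] : List String)) :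
    ∀ t ∈ ss, t.toList.length = 3 := by
  intro t ht
  have hm := h t ht
  fin_cases hm <;> decide

theorem pvKs_sorted : (["_r3", "_r2", "_r1", "_r0"] : List String).Pairwise (fun a b => b < a) := by
  simp [String.lt_iff_toList_lt]
  refine ⟨⟨?_, ?_, ?_⟩, ⟨?_, ?_⟩, ?_⟩ <;> decide

theorem pvMain (col : List String) (ss ks : List String)
    (hks : ks.Pairwise (fun a b => b < a))
    (hss : ∀ t ∈ ss, t ∈ (["_r0", "_r1", "_r2", "_r3"] : List String))
    (hmem : ∀ t, t ∈ ss ↔ t ∈ ks) :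
    PySem.List.sorted (col.filter (fun c => ss.any (fun s => PySem.Str.endswith c s))) pvKey true
      = (ks.map (fun k => col.filter (fun c => PySem.Str.endswith c k))).flatten := by
  have hlen := pvLen3 ss hss
  rw [pvSortedRev_groups ks hks _ ?hx]
  case hx =>
    intro c hc
    obtain ⟨t, ht, hct⟩ := List.any_eq_true.mp ((List.mem_filter.mp hc).2)
    rw [pvKey_of_endswith c t (hlen t ht) hct]
    exact (hmem t).mp ht
  unfold pvGroups
  congr 1
  apply List.map_congr_left
  intro k hk
  exact pvGroup_filter col k ss ((hmem k).mpr hk) hlen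

-- ===== VERDICT (by name: the statement is the Claim_ definition above) =====
theorem get_drop_roundfeature_spec : Claim_equal_get_drop_roundfeature := by
  intro col round_ _ hpre
  unfold Spec_get_drop_roundfeature get_drop_roundfeature get_drop_roundfeature_alt
  have hkeq : (fun c => PySem.Str.slice c (some (-3)) none) = pvKey := rfl
  rcases hpre with h | h | h | h | h <;> subst h <;>
    simp only [if_pos, or_true, true_or, hkeq,
      show (0:Int) ≠ 4 from by decide, show (0:Int) ≠ 3 from by decide,
      show (0:Int) ≠ 2 from by decide, show (0:Int) ≠ 1 from by decide,
      show (1:Int) ≠ 4 from by decide, show (1:Int) ≠ 3 from by decide,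
      show (1:Int) ≠ 2 from by decide, show (2:Int) ≠ 4 from by decide,
      show (2:Int) ≠ 3 from by decide, show (3:Int) ≠ 4 from by decide,
      reduceIte]
  · -- round_ = 0
    rw [show PySem.List.slice ["_r0", "_r1", "_r2", "_r3"] none (some 0) = [] from by decide,
      pvMain col [] [] (by simp) (by simp) (by simp)]
    simp
  · -- round_ = 1
    rw [show PySem.List.slice ["_r0", "_r1", "_r2", "_r3"] none (some 1) = ["_r0"] from by decide,
      pvMain col ["_r0"] ["_r0"] (by simp) (by simp) (by simp)]
    simp
  · -- round_ = 2
    rw [show PySem.List.slice ["_r0", "_r1", "_r2", "_r3"] none (some 2) = ["_r0", "_r1"] from by decide,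
      pvMain col ["_r0", "_r1"] ["_r1", "_r0"]
        (by simp [String.lt_iff_toList_lt]; decide) (by simp) (by intro t; simp; tauto)]
    simp
  · -- round_ = 3
    rw [show PySem.List.slice ["_r0", "_r1", "_r2", "_r3"] none (some 3) = ["_r0", "_r1", "_r2"] from by decide,
      pvMain col ["_r0", "_r1", "_r2"] ["_r2", "_r1", "_r0"]
        (by simp [String.lt_iff_toList_lt]; refine ⟨⟨?_, ?_⟩, ?_⟩ <;> decide)
        (by simp) (by intro t; simp; tauto)]
    simp
  · -- round_ = 4
    rw [show PySem.List.slice ["_r0", "_r1", "_r2", "_r3"] none (some 4) = ["_r0", "_r1", "_r2", "_r3"] from by decide,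
      pvMain col ["_r0", "_r1", "_r2", "_r3"] ["_r3", "_r2", "_r1", "_r0"]
        pvKs_sorted (by simp) (by intro t; simp; tauto)]
    simp
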